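-- pv_equiv track=rewrite | github.com/alxgom/anki-catala | card_helpers.py | vn
-- ===== SOURCE A (Python) =====
-- def vn(word: str, positions: list[int]) -> str:
--     """
--     Mark neutral vowels (vocal neutra) in a word.
--     Wraps characters at given positions with <span class="vn">.
--
--     Usage:
--         vn("petit", [0])   → 'p<span class="vn">e</span>tit'
--         vn("botiga", [0,5]) → '<span class="vn">b</span>otig<span class="vn">a</span>'
--     """
--     chars = list(word)
--     result = []
--     for i, ch in enumerate(chars):
--         if i in positions:
--             result.append(f'<span class="vn">{ch}</span>')
--         else:
--             result.append(ch)
--     return "".join(result)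
-- ===== SOURCE B (Python) =====
-- def vn(word: str, positions: list[int]) -> str:
--     # Position-driven: sort the valid marked indices, emit unmarked slices between them.
--     marks = sorted({p for p in positions if 0 <= p < len(word)})
--     parts = []
--     prev = 0
--     for p in marks:
--         parts.append(word[prev:p])
--         parts.append(f'<span class="vn">{word[p]}</span>')
--         prev = p + 1
--     parts.append(word[prev:])
--     return "".join(parts)
-- ===== Notes on version B (the rewrite author's own statement) =====
-- stated objective: faster
-- what changed: B is position-driven: it sorts the deduplicated valid positions and joins unmarked slices between them, instead of A's per-character scan that does a linear membership test in positions for every character.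
import Mathlib
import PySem

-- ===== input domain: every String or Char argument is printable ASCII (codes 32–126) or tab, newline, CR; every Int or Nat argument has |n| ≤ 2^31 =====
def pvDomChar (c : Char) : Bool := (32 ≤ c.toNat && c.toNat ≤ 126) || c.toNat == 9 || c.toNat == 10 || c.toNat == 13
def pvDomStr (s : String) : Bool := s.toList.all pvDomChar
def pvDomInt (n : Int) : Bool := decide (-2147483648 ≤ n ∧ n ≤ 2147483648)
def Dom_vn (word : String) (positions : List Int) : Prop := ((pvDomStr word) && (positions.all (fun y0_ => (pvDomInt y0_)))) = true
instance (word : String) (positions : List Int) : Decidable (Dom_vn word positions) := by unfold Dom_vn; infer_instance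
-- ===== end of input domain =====

-- B changes the algorithm (sort the valid positions, emit the slices between them) — faster when positions is long; return value proved identical.

-- ===== PORT A =====
-- f'<span class="vn">{ch}</span>' as a list of chars
def pvWrap (ch : Char) : List Char :=
  ("<span class=\"vn\">".toList) ++ [ch] ++ ("</span>".toList)

def vn (word : String) (positions : List Int) : String :=
  String.mk ((PySem.List.enumerate word.toList 0).foldl
    (fun acc p => acc ++ (if p.1 ∈ positions then pvWrap p.2 else [p.2])) [])

-- ===== PORT B =====
-- the loop over the sorted marks: slice before each mark, wrapped char, advance prev
def pvBLoop (cs : List Char) (ms : List Int) (prev : Int) : List Char :=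
  match ms with
  | [] => PySem.List.slice cs (some prev) none
  | p :: rest =>
      PySem.List.slice cs (some prev) (some p) ++ pvWrap (PySem.List.pyGetD cs p ' ')
        ++ pvBLoop cs rest (p + 1)

def vn_alt (word : String) (positions : List Int) : String :=
  String.mk (pvBLoop word.toList
    (PySem.List.sorted
      (PySem.Set.ofList (positions.filter
        (fun p => decide (0 ≤ p) && decide (p < (word.toList.length : Int)))))
      (fun x => x) false)
    0)

-- ===== PRECONDITION & SPEC =====
def Spec_vn (word : String) (positions : List Int) (out : String) : Prop := out = vn_alt word positions
instance (word : String) (positions : List Int) (out : String) : Decidable (Spec_vn word positions out) := by unfold Spec_vn; infer_instance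

-- ===== CLAIM (what is proved, stated in full; the proofs are below) =====
def Claim_equal_vn : Prop := ∀ (word : String) (positions : List Int), Dom_vn word positions → Spec_vn word positions (vn word positions)

-- ===== LEMMAS AND PROOFS =====

-- dropping k entries of an enumeration enumerates the dropped list, offset by k
lemma enumerate_drop (cs : List Char) : ∀ (s : Int) (k : Nat),
    (PySem.List.enumerate cs s).drop k = PySem.List.enumerate (cs.drop k) (s + k) := by
  induction cs with
  | nil => intro s k; simp [PySem.List.enumerate_nil]
  | cons c cs ih =>
    intro s k
    cases k with
    | zero => simp [PySem.List.enumerate_cons]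
    | succ k =>
      simp only [PySem.List.enumerate_cons, List.drop_succ_cons, ih (s + 1) k, List.drop]
      congr 1
      push_cast; ring

-- a fully-unmarked enumeration contributes its characters unchanged
lemma flatMap_unmarked (positions : List Int) (l : List (Int × Char))
    (h : ∀ p ∈ l, p.1 ∉ positions) :
    (l.flatMap (fun p => if p.1 ∈ positions then pvWrap p.2 else [p.2])) = l.map (·.2) := by
  induction l with
  | nil => rfl
  | cons q l ih =>
    simp only [List.flatMap_cons, List.map_cons]
    rw [if_neg (h q (by simp)), ih (fun p hp => h p (by simp [hp]))]
    rfl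

-- the B loop reproduces A's per-character output from position `prev` on,
-- given that `ms` is exactly the strictly increasing list of marked indices ≥ prev
lemma bloop_eq (positions : List Int) (cs : List Char) :
    ∀ (ms : List Int) (prev : Nat),
    ms.Pairwise (· < ·) →
    (∀ m : Int, m ∈ ms ↔ (m ∈ positions ∧ (prev : Int) ≤ m ∧ m < cs.length)) →
    pvBLoop cs ms prev =
      ((PySem.List.enumerate cs 0).drop prev).flatMap
        (fun p => if p.1 ∈ positions then pvWrap p.2 else [p.2]) := by
  intro ms
  induction ms with
  | nil =>
    intro prev _ hmem
    rw [enumerate_drop, flatMap_unmarked]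
    · simp only [pvBLoop, PySem.List.map_snd_enumerate, PySem.List.slice_from_natCast]
    · intro q hq
      rcases (PySem.List.mem_enumerate_iff _ _ _).1 hq with ⟨k, hk, rfl⟩
      intro hin
      simp only [List.length_drop] at hk
      have := (hmem _).2 ⟨hin, by push_cast; omega, by push_cast; omega⟩
      simp at this
  | cons p rest ih =>
    intro prev hpw hmem
    have hp0 := (hmem p).1 (by simp)
    obtain ⟨hpin, hple, hplt⟩ := hp0
    set pN : Nat := p.toNat with hpNdef
    have hpn : p = ((pN : Nat) : Int) := by omega
    have hprevle : prev ≤ pN := by omega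
    have hpNlt : pN < cs.length := by omega
    have hlenE : pN < (PySem.List.enumerate cs 0).length := by
      simpa [PySem.List.length_enumerate] using hpNlt
    have hrest : ∀ m : Int, m ∈ rest ↔ (m ∈ positions ∧ ((pN + 1 : Nat) : Int) ≤ m ∧ m < cs.length) := by
      intro m
      constructor
      · intro hm
        have h1 := (hmem m).1 (by simp [hm])
        have h2 : p < m := (List.pairwise_cons.1 hpw).1 m hm
        exact ⟨h1.1, by push_cast; omega, h1.2.2⟩
      · rintro ⟨h1, h2, h3⟩
        have : m ∈ p :: rest := (hmem m).2 ⟨h1, by push_cast at h2 ⊢; omega, h3⟩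
        rcases List.mem_cons.1 this with rfl | hm
        · push_cast at h2; omega
        · exact hm
    have hrec := ih (pN + 1) (List.pairwise_cons.1 hpw).2 hrest
    have hgetp : (PySem.List.enumerate cs 0)[pN]'hlenE = ((pN : Int), cs[pN]'hpNlt) := by
      rw [PySem.List.getElem_enumerate]; simp
    have hsplit : (PySem.List.enumerate cs 0).drop prev
        = ((PySem.List.enumerate cs 0).drop prev).take (pN - prev)
          ++ ((PySem.List.enumerate cs 0)[pN]'hlenE :: (PySem.List.enumerate cs 0).drop (pN + 1)) := by
      conv_lhs => rw [← List.take_append_drop (pN - prev) ((PySem.List.enumerate cs 0).drop prev)]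
      rw [List.drop_drop]
      congr 1
      rw [show prev + (pN - prev) = pN by omega, List.drop_eq_getElem_cons hlenE]
    have hpre : PySem.List.slice cs (some (prev : Int)) (some p)
        = (((PySem.List.enumerate cs 0).drop prev).take (pN - prev)).flatMap
            (fun q => if q.1 ∈ positions then pvWrap q.2 else [q.2]) := by
      rw [flatMap_unmarked]
      · rw [List.map_take, List.map_drop, PySem.List.map_snd_enumerate, hpn,
          PySem.List.slice_natCast]
      · intro q hq hin
        rcases List.mem_take_iff_getElem.1 hq with ⟨j, hj, hget⟩
        have hjlt : j < pN - prev := lt_of_lt_of_le hj (min_le_left _ _)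
        have hq1 : q.1 = ((prev + j : Nat) : Int) := by
          rw [← hget, List.getElem_drop, PySem.List.getElem_enumerate]
          push_cast; ring
        have hmem' := (hmem q.1).2 ⟨hin, by rw [hq1]; push_cast; omega,
          by rw [hq1]; push_cast; omega⟩
        rcases List.mem_cons.1 hmem' with heq | hm
        · rw [hq1] at heq; omega
        · have := (List.pairwise_cons.1 hpw).1 _ hm
          rw [hq1] at this; push_cast at this; omega
    have hmid : pvWrap (PySem.List.pyGetD cs p ' ')
        = (if ((pN : Int)) ∈ positions then pvWrap (cs[pN]'hpNlt) else [cs[pN]'hpNlt]) := by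
      rw [if_pos (hpn ▸ hpin), hpn, PySem.List.pyGetD_natCast,
        List.getD_eq_getElem cs ' ' hpNlt]
    have htail : pvBLoop cs rest (p + 1)
        = ((PySem.List.enumerate cs 0).drop (pN + 1)).flatMap
            (fun q => if q.1 ∈ positions then pvWrap q.2 else [q.2]) := by
      rw [← hrec, hpn]; norm_cast
    simp only [pvBLoop]
    rw [hsplit, List.flatMap_append, List.flatMap_cons, ← hpre, ← htail, hgetp, hmid]
    simp [List.append_assoc]

-- characterisation of B's sorted mark list
lemma marks_mem (positions : List Int) (n : Nat) (m : Int) :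
    m ∈ PySem.List.sorted
      (PySem.Set.ofList (positions.filter (fun p => decide (0 ≤ p) && decide (p < (n : Int)))))
      (fun x => x) false ↔ (m ∈ positions ∧ (0 : Int) ≤ m ∧ m < n) := by
  rw [PySem.List.mem_sorted, PySem.Set.mem_ofList, List.mem_filter]
  simp

-- ===== VERDICT (by name: the statement is the Claim_ definition above) =====
theorem vn_spec : Claim_equal_vn := by
  intro word positions _
  unfold Spec_vn vn vn_alt
  rw [PySem.List.foldl_append_eq_flatMap]
  have hb := bloop_eq positions word.toList _ 0
    (PySem.List.sorted_ofList_pairwise_lt _)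
    (fun m => by
      have h := marks_mem positions word.toList.length m
      push_cast at h ⊢
      exact h)
  simp only [Nat.cast_zero, List.drop_zero] at hb
  rw [List.nil_append, ← hb]
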